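-- pv_equiv track=rewrite | github.com/xunilrj/sandbox | sources/courses/columbia-ia/sentiment/driver_3.py | textArrayToWordsArray
-- ===== SOURCE A (Python) =====
-- from queue import Queue
--
-- stopwords = []
--
-- def textArrayToWordsArray(lines, size = 1):
--     def grams(lines):
--         q = Queue()
--         if(size > 1):
--             q.put("<START>")
--         words = [word for word in line.split(" ") if (word.lower() not in stopwords)]
--         for word in words:
--             q.put(word)
--             if(q.qsize() == size):
--                 ngram = "_".join(list(q.queue))
--                 q.get()
--                 yield ngram
--         if(size > 1):
--             q.put("<END>")
--             if(q.qsize() == size):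
--                 ngram = "_".join(list(q.queue))
--                 q.get()
--                 yield ngram
--     D = []
--     for line in lines:
--         D.append({gram:1 for gram in grams(lines)})
--     return D
-- ===== SOURCE B (Python) =====
-- stopwords = []
--
-- def textArrayToWordsArray(lines, size = 1):
--     D = []
--     for line in lines:
--         words = [word for word in line.split(" ") if (word.lower() not in stopwords)]
--         tokens = ["<START>"] + words + ["<END>"] if size > 1 else words
--         d = {}
--         if size >= 1:
--             for i in range(len(tokens) - size + 1):
--                 d["_".join(tokens[i:i + size])] = 1
--         D.append(d)
--     return D
-- ===== Notes on version B (the rewrite author's own statement) =====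
-- stated objective: simpler
-- what changed: Replaced the Queue-based sliding-window generator (mutable Queue object with fill/drain steps and a separate <END> epilogue) by building the padded token list once and emitting each n-gram as a join of an index slice tokens[i:i+size].
import Mathlib
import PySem

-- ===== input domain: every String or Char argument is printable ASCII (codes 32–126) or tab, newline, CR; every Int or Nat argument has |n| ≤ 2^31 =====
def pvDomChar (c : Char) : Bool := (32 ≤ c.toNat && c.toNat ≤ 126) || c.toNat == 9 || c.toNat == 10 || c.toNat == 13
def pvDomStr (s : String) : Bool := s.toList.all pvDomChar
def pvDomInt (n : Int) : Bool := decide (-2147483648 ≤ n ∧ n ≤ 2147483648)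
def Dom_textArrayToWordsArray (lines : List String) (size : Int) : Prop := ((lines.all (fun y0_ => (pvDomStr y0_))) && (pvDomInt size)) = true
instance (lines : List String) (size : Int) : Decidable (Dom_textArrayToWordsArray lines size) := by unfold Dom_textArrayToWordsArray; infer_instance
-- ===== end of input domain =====

-- B replaces A's Queue-based sliding-window generator by slicing a once-built padded
-- token list; same values everywhere (objective: simpler).

-- ===== PORT A =====
def pvStopwords : List String := []

-- the identical filtered-split line both Pythons contain
def pvWordsOf (line : String) : List String :=
  ((PySem.Str.split? line " ").getD []).filter (fun w => !(pvStopwords.contains (PySem.Str.lower w)))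

-- body of A's 'for word in words' loop: state = (queue contents, yielded grams)
def pvStep (size : Int) (st : List String × List String) (w : String) : List String × List String :=
  let q := st.1 ++ [w]
  if (q.length : Int) = size then (q.tail, st.2 ++ [PySem.Str.join "_" q]) else (q, st.2)

-- A's generator grams(lines) (it ignores its argument and reads the current line)
def pvGramsA (size : Int) (line : String) : List String :=
  let q0 : List String := if size > 1 then ["<START>"] else []
  let st := (pvWordsOf line).foldl (pvStep size) (q0, [])
  if size > 1 then
    let q := st.1 ++ ["<END>"]
    if (q.length : Int) = size then st.2 ++ [PySem.Str.join "_" q] else st.2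
  else st.2

def textArrayToWordsArray (lines : List String) (size : Int) : List (List (String × Int)) :=
  lines.foldl (fun D line =>
    D ++ [((pvGramsA size line).foldl (fun d g => d.insert g (1 : Int))
            (PySem.Dict.empty : PySem.Dict String Int)).items]) []

-- ===== PORT B =====
def pvGramsB (size : Int) (line : String) : List String :=
  let words := pvWordsOf line
  let tokens := if size > 1 then ["<START>"] ++ words ++ ["<END>"] else words
  if size ≥ 1 then
    (PySem.List.pyRange 0 ((tokens.length : Int) - size + 1) 1).map
      (fun i => PySem.Str.join "_" (PySem.List.slice tokens (some i) (some (i + size))))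
  else []

def textArrayToWordsArray_alt (lines : List String) (size : Int) : List (List (String × Int)) :=
  lines.foldl (fun D line =>
    D ++ [((pvGramsB size line).foldl (fun d g => d.insert g (1 : Int))
            (PySem.Dict.empty : PySem.Dict String Int)).items]) []

-- ===== PRECONDITION & SPEC =====
def Spec_textArrayToWordsArray (lines : List String) (size : Int) (out : List (List (String × Int))) : Prop := out = textArrayToWordsArray_alt lines size
instance (lines : List String) (size : Int) (out : List (List (String × Int))) : Decidable (Spec_textArrayToWordsArray lines size out) := by unfold Spec_textArrayToWordsArray; infer_instance

-- ===== CLAIM (what is proved, stated in full; the proofs are below) =====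
def Claim_equal_textArrayToWordsArray : Prop := ∀ (lines : List String) (size : Int), Dom_textArrayToWordsArray lines size → Spec_textArrayToWordsArray lines size (textArrayToWordsArray lines size)

-- ===== LEMMAS AND PROOFS =====

-- all length-s windows of ts, joined with "_"
def pvWindows (s : Nat) (ts : List String) : List String :=
  (List.range (ts.length + 1 - s)).map (fun k => PySem.Str.join "_" ((ts.drop k).take s))

lemma pvWindows_short (s : Nat) (ts : List String) (h : ts.length < s) :
    pvWindows s ts = [] := by
  unfold pvWindows
  have : ts.length + 1 - s = 0 := by omega
  simp [this]

lemma pvWindows_cons (s : Nat) (ts : List String) (hs : 1 ≤ s) (h : s ≤ ts.length) :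
    pvWindows s ts = PySem.Str.join "_" (ts.take s) :: pvWindows s (ts.drop 1) := by
  unfold pvWindows
  have h1 : ts.length + 1 - s = (ts.length - s) + 1 := by omega
  have h2 : (ts.drop 1).length + 1 - s = ts.length - s := by
    rw [List.length_drop]; omega
  rw [h1, h2, List.range_succ_eq_map, List.map_cons, List.map_map]
  congr 1
  apply List.map_congr_left
  intro k _
  simp [Function.comp]

lemma pvWindows_snoc (s : Nat) (ts : List String) (x : String) (hs : 1 ≤ s) :
    pvWindows s (ts ++ [x]) =
      pvWindows s ts ++
        (if s ≤ ts.length + 1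
         then [PySem.Str.join "_" (ts.drop (ts.length + 1 - s) ++ [x])] else []) := by
  unfold pvWindows
  by_cases h : s ≤ ts.length + 1
  · have h1 : (ts ++ [x]).length + 1 - s = (ts.length + 1 - s) + 1 := by simp; omega
    rw [h1, List.range_succ]
    simp only [List.map_append, List.map, h, if_true]
    congr 1
    · apply List.map_congr_left
      intro k hk
      simp only [List.mem_range] at hk
      congr 1
      rw [List.drop_append_of_le_length (by omega)]
      rw [List.take_append_of_le_length (by rw [List.length_drop]; omega)]
    · congr 2
      rw [List.drop_append_of_le_length (by omega)]
      rw [List.take_of_length_le (by simp [List.length_drop]; omega)]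
  · have h1 : (ts ++ [x]).length + 1 - s = 0 := by simp; omega
    have h2 : ts.length + 1 - s = 0 := by omega
    rw [h1, h2]
    simp [h]

-- A's word loop, run from a not-yet-full queue, yields exactly the windows of q ++ ws
-- and leaves the tokens past the last window start in the queue.
lemma pvLoop (s : Nat) (hs : 1 ≤ s) (ws : List String) :
    ∀ (q out : List String), q.length < s →
      ws.foldl (pvStep (s : Int)) (q, out) =
        ((q ++ ws).drop ((q ++ ws).length + 1 - s), out ++ pvWindows s (q ++ ws)) := by
  induction ws with
  | nil =>
      intro q out hq
      have h0 : q.length + 1 - s = 0 := by omega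
      simp [pvWindows_short s q (by omega), h0]
  | cons w ws ih =>
      intro q out hq
      rw [List.foldl_cons]
      by_cases h : q.length + 1 = s
      · have hstep : pvStep (s : Int) (q, out) w =
            ((q ++ [w]).tail, out ++ [PySem.Str.join "_" (q ++ [w])]) := by
          simp only [pvStep]
          rw [if_pos (by simp; omega)]
        rw [hstep, ih ((q ++ [w]).tail) _ (by simp; omega)]
        have htail : (q ++ [w]).tail ++ ws = ((q ++ [w]) ++ ws).drop 1 := by
          rw [List.drop_append_of_le_length (by simp), List.drop_one]
        have hassoc : q ++ w :: ws = (q ++ [w]) ++ ws := by simp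
        rw [Prod.mk.injEq]
        refine ⟨?_, ?_⟩
        · rw [htail, List.drop_drop, hassoc]
          congr 1
          simp
          omega
        · rw [hassoc, pvWindows_cons s ((q ++ [w]) ++ ws) hs (by simp; omega)]
          rw [List.take_append_of_le_length (by simp; omega)]
          rw [List.take_of_length_le (by simp; omega)]
          rw [← htail]
          simp
      · have hstep : pvStep (s : Int) (q, out) w = (q ++ [w], out) := by
          simp only [pvStep]
          rw [if_neg (by simp; omega)]
        rw [hstep, ih (q ++ [w]) _ (by simp; omega)]
        simp

-- for size ≤ 0 the queue-size test never fires
lemma pvLoop_nonpos (size : Int) (h : size ≤ 0) (ws : List String) :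
    ∀ (q out : List String), (ws.foldl (pvStep size) (q, out)).2 = out := by
  induction ws with
  | nil => intro q out; rfl
  | cons w ws ih =>
      intro q out
      rw [List.foldl_cons]
      have hstep : pvStep size (q, out) w = (q ++ [w], out) := by
        simp only [pvStep]
        rw [if_neg (by simp; omega)]
      rw [hstep]
      exact ih _ _

-- B's pyRange/slice comprehension computes pvWindows
lemma pvB_eq_windows (size : Int) (h : 1 ≤ size) (ts : List String) :
    (PySem.List.pyRange 0 ((ts.length : Int) - size + 1) 1).map
        (fun i => PySem.Str.join "_" (PySem.List.slice ts (some i) (some (i + size)))) =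
      pvWindows size.toNat ts := by
  rw [PySem.List.pyRange_one, List.map_map]
  unfold pvWindows
  have hn : (((ts.length : Int) - size + 1) - 0).toNat = ts.length + 1 - size.toNat := by omega
  rw [hn]
  apply List.map_congr_left
  intro k _
  have h0 : (0 : Int) + (k : Int) = ((k : Nat) : Int) := by ring
  have hsz : ((size.toNat : Nat) : Int) = size := by omega
  simp only [Function.comp_apply, h0]
  rw [← hsz, PySem.List.slice_natCast_add]
  norm_cast

lemma pvGramsA_pos (s : Nat) (hs : 2 ≤ s) (line : String) :
    pvGramsA (s : Int) line = pvWindows s ((["<START>"] ++ pvWordsOf line) ++ ["<END>"]) := by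
  have hgt : ((s : Int) > 1) := by omega
  have hL := pvLoop s (by omega) (pvWordsOf line) ["<START>"] [] (by simp; omega)
  simp only [pvGramsA]
  rw [if_pos hgt, if_pos hgt, hL]
  dsimp only
  rw [pvWindows_snoc s (["<START>"] ++ pvWordsOf line) "<END>" (by omega)]
  by_cases hc : s ≤ (pvWordsOf line).length + 2
  · rw [if_pos (by simp; omega), if_pos (by simp; omega)]
    simp
  · rw [if_neg (by simp; omega), if_neg (by simp; omega)]
    simp

lemma pvGramsA_one (line : String) : pvGramsA 1 line = pvWindows 1 (pvWordsOf line) := by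
  have hL := pvLoop 1 (le_refl 1) (pvWordsOf line) [] [] (by simp)
  have hone : (((1 : Nat)) : Int) = 1 := by norm_num
  rw [hone] at hL
  simp only [pvGramsA]
  rw [if_neg (by omega), if_neg (by omega), hL]
  simp

lemma pvGrams_eq (size : Int) (line : String) : pvGramsA size line = pvGramsB size line := by
  by_cases h1 : 1 ≤ size
  · have hB : pvGramsB size line =
        pvWindows size.toNat
          (if size > 1 then ["<START>"] ++ pvWordsOf line ++ ["<END>"] else pvWordsOf line) := by
      simp only [pvGramsB]
      rw [if_pos h1]
      exact pvB_eq_windows size h1 _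
    by_cases h2 : 1 < size
    · rw [hB, if_pos h2]
      have hcast : ((size.toNat : Nat) : Int) = size := by omega
      rw [← hcast, pvGramsA_pos size.toNat (by omega) line]
      congr 1
    · have hs1 : size = 1 := by omega
      subst hs1
      rw [hB, if_neg (by norm_num)]
      have ht : (1 : Int).toNat = 1 := rfl
      rw [ht]
      exact pvGramsA_one line
  · have hA : pvGramsA size line = [] := by
      simp only [pvGramsA]
      rw [if_neg (by omega), if_neg (by omega)]
      exact pvLoop_nonpos size (by omega) (pvWordsOf line) [] []
    have hBe : pvGramsB size line = [] := by
      simp only [pvGramsB]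
      rw [if_neg (by omega)]
    rw [hA, hBe]

-- ===== VERDICT (by name: the statement is the Claim_ definition above) =====
theorem textArrayToWordsArray_spec : Claim_equal_textArrayToWordsArray := by
  intro lines size _
  unfold Spec_textArrayToWordsArray textArrayToWordsArray textArrayToWordsArray_alt
  simp [pvGrams_eq]
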